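-- pv_equiv track=rewrite | github.com/evgenius1424/remove-anagrams-and-subanagrams | solutions/python/solution_02_pairwise.py | remove_anagrams_and_sub_anagrams_pairwise
-- ===== SOURCE A (Python) =====
-- from typing import List, Tuple
-- from collections import Counter, defaultdict
--
-- def get_frequency_vector(word: str) -> Tuple[int, ...]:
--     """Get frequency vector for a word."""
--     freq = [0] * 26
--     for char in word:
--         freq[ord(char) - ord('a')] += 1
--     return tuple(freq)
--
-- def is_dominated_by(smaller: Tuple[int, ...], larger: Tuple[int, ...]) -> bool:
--     """Check if smaller frequency vector is dominated by larger."""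
--     smaller_sum = sum(smaller)
--     larger_sum = sum(larger)
--
--     if smaller_sum >= larger_sum:
--         return False
--
--     for i in range(26):
--         if smaller[i] > larger[i]:
--             return False
--
--     return True
--
-- def remove_anagrams_and_sub_anagrams_pairwise(words: List[str]) -> List[str]:
--     """Remove anagrams and sub-anagrams using frequency vectors and pairwise comparison."""
--     if not words:
--         return []
--
--     # Group words by frequency vector
--     grouped_by_freq = defaultdict(list)
--     for word in words:
--         freq = get_frequency_vector(word)
--         grouped_by_freq[tuple(freq)].append(word)
--
--     # Keep only groups with single words (no anagrams)
--     unique_groups = []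
--     for freq, word_list in grouped_by_freq.items():
--         if len(word_list) == 1:
--             unique_groups.append((list(freq), word_list[0]))
--
--     # Find maximal (non-dominated) frequency vectors
--     maximal_groups = []
--     for candidate in unique_groups:
--         candidate_freq, candidate_word = candidate
--         is_dominated = False
--
--         for other in unique_groups:
--             other_freq, other_word = other
--             if candidate != other and is_dominated_by(candidate_freq, other_freq):
--                 is_dominated = True
--                 break
--
--         if not is_dominated:
--             maximal_groups.append(candidate_word)
--
--     return maximal_groups
-- ===== SOURCE B (Python) =====
-- from typing import List
-- from collections import Counter
--
--
-- def _freq(word):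
--     freq = [0] * 26
--     for char in word:
--         freq[ord(char) - ord('a')] += 1
--     return tuple(freq)
--
--
-- def remove_anagrams_and_sub_anagrams_pairwise(words: List[str]) -> List[str]:
--     freqs = [_freq(w) for w in words]
--     cnt = Counter(freqs)
--     # survivors of anagram removal, in original first-appearance order
--     singles = [(list(f), w) for w, f in zip(words, freqs) if cnt[f] == 1]
--     # sweep by total length descending: only earlier-accepted vectors can dominate
--     ordered = sorted(singles, key=lambda p: sum(p[0]), reverse=True)
--     accepted = []
--     for f, w in ordered:
--         s = sum(f)
--         if not any(sum(g) > s and all(a <= b for a, b in zip(f, g)) for g in accepted):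
--             accepted.append(f)
--     return [w for f, w in singles if f in accepted]
-- ===== Notes on version B (the rewrite author's own statement) =====
-- stated objective: alternative
-- what changed: Replaces A's dict-of-lists grouping plus all-pairs domination scan by a Counter-based survivor pass, a sort of survivors by total length descending, and a single sweep that tests domination only against already-accepted maximal vectors, finally re-emitting accepted words in original order.
import Mathlib
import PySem

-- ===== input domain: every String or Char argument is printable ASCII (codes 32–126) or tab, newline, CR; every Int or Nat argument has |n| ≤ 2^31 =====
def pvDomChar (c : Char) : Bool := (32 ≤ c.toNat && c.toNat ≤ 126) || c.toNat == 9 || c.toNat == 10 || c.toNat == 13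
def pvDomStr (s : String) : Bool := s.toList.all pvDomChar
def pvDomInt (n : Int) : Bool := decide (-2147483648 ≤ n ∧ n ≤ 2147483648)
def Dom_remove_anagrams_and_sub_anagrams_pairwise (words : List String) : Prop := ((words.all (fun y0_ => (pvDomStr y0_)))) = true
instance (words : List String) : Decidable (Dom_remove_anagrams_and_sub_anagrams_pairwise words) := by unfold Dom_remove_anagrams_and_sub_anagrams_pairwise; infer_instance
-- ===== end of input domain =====

-- B re-implements A with a Counter-based anagram pass, a descending sort by total length and a
-- single sweep testing domination only against already-accepted maximal vectors, re-emitting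
-- accepted words in original order (objective: alternative algorithm, similar cost).


-- ===== PORT A =====
-- get_frequency_vector: freq[ord(c) - ord('a')] += 1 on a 26-list, with Python's index
-- semantics (negative indices wrap; out-of-range raises — excluded by Pre_, where pySetD/pyGetD
-- are exact).  Source B's _freq is the identical code, so both ports share this helper.
def pyFreqVec (w : String) : List Int :=
  w.toList.foldl
    (fun freq c =>
      PySem.List.pySetD freq ((c.toNat : Int) - 97)
        (PySem.List.pyGetD freq ((c.toNat : Int) - 97) 0 + 1))
    (List.replicate 26 0)

-- is_dominated_by, transliterated (early `return False`s become the if-chain / any)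
def isDominatedBy (smaller larger : List Int) : Bool :=
  let smaller_sum := smaller.sum
  let larger_sum := larger.sum
  if smaller_sum ≥ larger_sum then false
  else if (PySem.List.pyRange 0 26 1).any
      (fun i => PySem.List.pyGetD smaller i 0 > PySem.List.pyGetD larger i 0) then false
  else true

def remove_anagrams_and_sub_anagrams_pairwise (words : List String) : List String :=
  if words = [] then []
  else
    -- grouped_by_freq[freq].append(word)  (defaultdict(list))
    let grouped := words.foldl
      (fun d w => d.modify (pyFreqVec w) [] (fun l => l ++ [w])) PySem.Dict.empty
    -- keep only singleton groups
    let uniq := grouped.items.foldl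
      (fun acc p => if p.2.length == 1 then acc ++ [(p.1, p.2.headI)] else acc)
      ([] : List (List Int × String))
    -- pairwise maximality scan with break flag
    uniq.foldl
      (fun acc c =>
        if uniq.any (fun o => decide (o ≠ c) && isDominatedBy c.1 o.1) then acc
        else acc ++ [c.2])
      ([] : List String)

-- ===== PORT B =====
def remove_anagrams_and_sub_anagrams_pairwise_alt (words : List String) : List String :=
  let freqs := words.map pyFreqVec
  let cnt := PySem.Dict.counter freqs
  let singles := ((words.zip freqs).filter (fun p => cnt.getD p.2 0 == 1)).map
    (fun p => (p.2, p.1))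
  let ordered := PySem.List.sorted singles (fun p => p.1.sum) true
  let accepted := ordered.foldl
    (fun acc p =>
      if acc.any (fun g => g.sum > p.1.sum && (p.1.zip g).all (fun q => q.1 ≤ q.2)) then acc
      else acc ++ [p.1])
    ([] : List (List Int))
  (singles.filter (fun p => accepted.contains p.1)).map (fun p => p.2)

-- ===== PRECONDITION & SPEC =====
-- Pre_ excludes words containing a character outside 'G'..'z' (code 71–122): there
-- freq[ord(c) - ord('a')] indexes a 26-list out of range and BOTH A and B raise IndexError.
def Pre_remove_anagrams_and_sub_anagrams_pairwise (words : List String) : Prop :=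
  (words.all (fun w => w.toList.all (fun c => 71 ≤ c.toNat && c.toNat ≤ 122))) = true
instance (words : List String) : Decidable (Pre_remove_anagrams_and_sub_anagrams_pairwise words) := by
  unfold Pre_remove_anagrams_and_sub_anagrams_pairwise; infer_instance

def pvWitness_remove_anagrams_and_sub_anagrams_pairwise : List String := ["abc", "cab", "ab", "b", "de", "x"]

def Spec_remove_anagrams_and_sub_anagrams_pairwise (words : List String) (out : List String) : Prop := out = remove_anagrams_and_sub_anagrams_pairwise_alt words
instance (words : List String) (out : List String) : Decidable (Spec_remove_anagrams_and_sub_anagrams_pairwise words out) := by unfold Spec_remove_anagrams_and_sub_anagrams_pairwise; infer_instance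

-- ===== CLAIM (what is proved, stated in full; the proofs are below) =====
def Claim_equal_remove_anagrams_and_sub_anagrams_pairwise : Prop := ∀ (words : List String), Dom_remove_anagrams_and_sub_anagrams_pairwise words → Pre_remove_anagrams_and_sub_anagrams_pairwise words → Spec_remove_anagrams_and_sub_anagrams_pairwise words (remove_anagrams_and_sub_anagrams_pairwise words)

-- ===== LEMMAS AND PROOFS =====

def domB (f g : List Int) : Bool := g.sum > f.sum && (f.zip g).all (fun q => q.1 ≤ q.2)

theorem length_pyFreqVec (w : String) : (pyFreqVec w).length = 26 := by
  unfold pyFreqVec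
  have H : ∀ (cs : List Char) (init : List Int),
      (cs.foldl (fun freq c =>
        PySem.List.pySetD freq ((c.toNat : Int) - 97)
          (PySem.List.pyGetD freq ((c.toNat : Int) - 97) 0 + 1)) init).length = init.length := by
    intro cs
    induction cs with
    | nil => intro init; rfl
    | cons c cs ih => intro init; rw [List.foldl_cons, ih]; simp [PySem.List.length_pySetD]
  rw [H]; simp

theorem zipall_iff {f g : List Int} (h : f.length = g.length) :
    ((f.zip g).all (fun q => q.1 ≤ q.2) = true) ↔ ∀ i (hi : i < f.length), f[i] ≤ g[i] := by
  rw [List.all_eq_true]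
  constructor
  · intro H i hi
    exact (decide_eq_true_iff).1 (H ((f[i],g[i])) (by
      have : i < (f.zip g).length := by simp [List.length_zip, h]; omega
      simpa using (List.getElem_zip (l:=f) (l':=g) (i:=i)) ▸ List.getElem_mem this))
  · intro H q hq
    obtain ⟨i, hi, hq⟩ := List.mem_iff_getElem.1 hq
    have hif : i < f.length := by simp [List.length_zip] at hi; omega
    subst hq; simp [List.getElem_zip]
    exact H i hif

theorem domB_self (f : List Int) : domB f f = false := by
  simp [domB]

theorem domEq {s l : List Int} (hs : s.length = 26) (hl : l.length = 26) :
    isDominatedBy s l = domB s l := by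
  unfold isDominatedBy domB
  dsimp only
  by_cases hsum : s.sum ≥ l.sum
  · have : ¬ (s.sum < l.sum) := by omega
    simp [hsum, this]
  · have hlt : l.sum > s.sum := by omega
    rw [if_neg hsum]
    have key : ((PySem.List.pyRange 0 26).any fun i => decide (PySem.List.pyGetD s i 0 > PySem.List.pyGetD l i 0)) = !((s.zip l).all fun q => decide (q.1 ≤ q.2)) := by
      rw [Bool.eq_iff_iff]
      simp only [List.any_eq_true, decide_eq_true_eq, Bool.not_eq_true']
      rw [Bool.eq_false_iff, Ne, zipall_iff (by omega)]
      constructor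
      · rintro ⟨i, hmem, hgt⟩ hall
        rw [PySem.List.mem_pyRange_one] at hmem
        have h0 : (0:Int) ≤ i := hmem.1
        have h26 : i < 26 := hmem.2
        have hn : i.toNat < s.length := by omega
        rw [PySem.List.pyGetD_eq_getElem s 0 (by omega) (by omega),
            PySem.List.pyGetD_eq_getElem l 0 (by omega) (by omega)] at hgt
        exact absurd (hall i.toNat hn) (by omega)
      · intro hnall
        push Not at hnall
        obtain ⟨j, hj, hgt⟩ := hnall
        refine ⟨(j:Int), ?_, ?_⟩
        · rw [PySem.List.mem_pyRange_one]; omega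
        · rw [PySem.List.pyGetD_eq_getElem s 0 (by omega) (by omega),
              PySem.List.pyGetD_eq_getElem l 0 (by omega) (by omega)]
          simpa using hgt
    rw [key]
    cases hb : ((s.zip l).all fun q => decide (q.1 ≤ q.2)) <;> simp [hlt]

theorem domB_trans {f g h : List Int} (hf : f.length = 26) (hg : g.length = 26)
    (hh : h.length = 26) (h1 : domB f g = true) (h2 : domB g h = true) : domB f h = true := by
  unfold domB at *
  simp only [Bool.and_eq_true, decide_eq_true_eq] at *
  obtain ⟨s1, a1⟩ := h1
  obtain ⟨s2, a2⟩ := h2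
  refine ⟨by omega, ?_⟩
  rw [zipall_iff (by omega)] at *
  intro i hi
  have := a1 i (by omega)
  have := a2 i (by omega)
  omega

def survivors (words : List String) : List (List Int × String) :=
  (words.filter (fun w => (words.map pyFreqVec).count (pyFreqVec w) == 1)).map
    (fun w => (pyFreqVec w, w))

theorem dedup_filter_of_count_le {α : Type} [BEq α] [LawfulBEq α] (xs : List α) (p : α → Bool)
    (H : ∀ k, p k = true → xs.count k ≤ 1) :
    (PySem.Set.ofList xs).filter p = xs.filter p := by
  induction xs with
  | nil => rfl
  | cons x xs ih =>
    have H' : ∀ k, p k = true → xs.count k ≤ 1 := by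
      intro k hk
      have := H k hk
      by_cases hkx : k = x
      · subst hkx; simp [List.count_cons_self] at this; omega
      · simp [Ne.symm hkx] at this
        omega
    rw [PySem.Set.ofList_cons, List.filter_cons, List.filter_cons]
    have hfd : ((PySem.Set.ofList xs).discard x).filter p = ((PySem.Set.ofList xs).filter p).filter (fun y => !(y == x)) := by
      unfold PySem.Set.discard
      rw [List.filter_filter, List.filter_filter]
      exact List.filter_congr (fun y hy => Bool.and_comm _ _)
    by_cases hp : p x = true
    · have h1 : (x :: xs).count x ≤ 1 := H x hp
      have hx : x ∉ xs := by
        intro hmem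
        have hpos : 0 < xs.count x := by rw [List.count_pos_iff]; exact hmem
        simp [List.count_cons_self] at h1
        omega
      have hdisc : ((PySem.Set.ofList xs).filter p).filter (fun y => !(y == x)) = (PySem.Set.ofList xs).filter p := by
        apply List.filter_eq_self.2
        intro y hy
        have hymem : y ∈ PySem.Set.ofList xs := List.mem_of_mem_filter hy
        have hyx : y ∈ xs := (PySem.Set.mem_ofList _ _).1 hymem
        have : y ≠ x := fun he => hx (he ▸ hyx)
        simpa using this
      rw [hp, hfd, hdisc, ih H']
    · rw [Bool.not_eq_true] at hp
      rw [hp, hfd]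
      have hsame : ((PySem.Set.ofList xs).filter p).filter (fun y => !(y == x)) = (PySem.Set.ofList xs).filter p := by
        apply List.filter_eq_self.2
        intro y hy
        have hpy : p y = true := List.of_mem_filter hy
        have : y ≠ x := fun he => by rw [he] at hpy; rw [hpy] at hp; cases hp
        simpa using this
      rw [hsame, ih H']

theorem count_fv (words : List String) (k : List Int) :
    (words.filter (fun w => pyFreqVec w == k)).length = (words.map pyFreqVec).count k := by
  rw [List.count, List.countP_map, List.countP_eq_length_filter]
  rfl

theorem A_uniq_eq (words : List String) :
    ((words.foldl (fun d w => d.modify (pyFreqVec w) [] (fun l => l ++ [w]))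
        PySem.Dict.empty).items.foldl
      (fun acc p => if p.2.length == 1 then acc ++ [(p.1, p.2.headI)] else acc)
      ([] : List (List Int × String))) = survivors words := by
  set grouped := words.foldl (fun d w => d.modify (pyFreqVec w) [] (fun l => l ++ [w])) PySem.Dict.empty with hg
  have hkeys : grouped.keys = PySem.Set.ofList (words.map pyFreqVec) := by
    rw [hg, PySem.Dict.keys_foldl_modify_key words pyFreqVec [] (fun _ w => fun l => l ++ [w])]
    simp [PySem.Set.update_nil_left]
  have hnodup : grouped.keys.Nodup := by
    rw [hg]
    exact PySem.Dict.nodup_keys_foldl_modify_key words pyFreqVec [] _ _ (by simp)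
  have hgetD : ∀ k, grouped.getD k [] = words.filter (fun w => pyFreqVec w == k) := by
    intro k
    have hfm := List.foldl_map (f := fun w : String => (pyFreqVec w, w))
      (g := fun (d : PySem.Dict (List Int) (List String)) (p : List Int × String) => d.modify p.1 [] (fun l => l ++ [p.2]))
      (l := words) (init := PySem.Dict.empty)
    rw [hg, ← hfm, PySem.Dict.getD_foldl_modify_append]
    rw [List.filter_map, List.map_map]
    simp [Function.comp_def, PySem.Dict.getD_empty]
  rw [PySem.List.foldl_append_if (fun p : List Int × List String => p.2.length == 1) (fun p : List Int × List String => (p.1, p.2.headI))]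
  rw [PySem.Dict.items_eq_map_keys grouped hnodup []]
  rw [List.filter_map, List.map_map]
  have hpred : ∀ k, ((fun p : List Int × List String => p.2.length == 1) ∘ (fun k => (k, grouped.getD k []))) k
      = ((words.map pyFreqVec).count k == 1) := by
    intro k
    simp only [Function.comp_def, hgetD, count_fv]
  rw [List.filter_congr (fun k _ => hpred k)]
  rw [hkeys, dedup_filter_of_count_le _ _ (by
    intro k hk
    simp only [beq_iff_eq] at hk
    omega)]
  rw [List.filter_map, List.map_map]
  unfold survivors
  rw [List.nil_append]
  apply List.map_congr_left
  intro w hw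
  have hP : (words.map pyFreqVec).count (pyFreqVec w) = 1 := by
    have := (List.mem_filter.1 hw).2
    simpa using this
  have hwmem : w ∈ words.filter (fun w' => pyFreqVec w' == pyFreqVec w) := by
    rw [List.mem_filter]
    exact ⟨(List.mem_filter.1 hw).1, by simp⟩
  have hlen : (words.filter (fun w' => pyFreqVec w' == pyFreqVec w)).length = 1 := by
    rw [count_fv]; exact hP
  obtain ⟨a, ha⟩ := List.length_eq_one_iff.1 hlen
  have hwa : a = w := by
    rw [ha] at hwmem
    exact (List.mem_singleton.1 hwmem).symm
  simp only [Function.comp_def]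
  rw [hgetD, ha, hwa]
  rfl

theorem B_singles_eq (words : List String) :
    ((words.zip (words.map pyFreqVec)).filter
        (fun p => (PySem.Dict.counter (words.map pyFreqVec)).getD p.2 0 == 1)).map
      (fun p => (p.2, p.1)) = survivors words := by
  have hz : words.zip (words.map pyFreqVec) = words.map (fun w => (w, pyFreqVec w)) := by
    calc words.zip (words.map pyFreqVec) = (words.map id).zip (words.map pyFreqVec) := by
          rw [List.map_id]
      _ = words.map (fun w => (w, pyFreqVec w)) := List.zip_map'
  rw [hz, List.filter_map, List.map_map]
  unfold survivors
  have hpred : ∀ w ∈ words,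
      ((fun p : String × List Int => (PySem.Dict.counter (words.map pyFreqVec)).getD p.2 0 == 1) ∘
        (fun w => (w, pyFreqVec w))) w = ((words.map pyFreqVec).count (pyFreqVec w) == 1) := by
    intro w _
    simp only [Function.comp_def, PySem.Dict.getD_counter]
    rw [Bool.eq_iff_iff]
    simp only [beq_iff_eq]
    omega
  rw [List.filter_congr hpred]
  rfl

def domDD (T : List (List Int × String)) (c : List Int) : Bool := T.any (fun o => domB c o.1)

theorem domclose (T processed rest : List (List Int × String))
    (hT : T = processed ++ rest)
    (hsort : T.Pairwise (fun a b => b.1.sum ≤ a.1.sum))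
    (hlen : ∀ p ∈ T, p.1.length = 26) :
    ∀ (k : Nat) (x : List Int), x.length = 26 →
      (T.filter (fun o => decide (x.sum < o.1.sum))).length ≤ k →
      (∃ o ∈ processed, domB x o.1 = true) →
      ∃ m ∈ processed, domDD T m.1 = false ∧ domB x m.1 = true := by
  intro k
  induction k with
  | zero =>
    intro x hx hk ⟨o, ho, hdom⟩
    exfalso
    have hsum : x.sum < o.1.sum := by
      unfold domB at hdom
      simp only [Bool.and_eq_true, decide_eq_true_eq] at hdom
      omega
    have homem : o ∈ T := by rw [hT]; exact List.mem_append_left _ ho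
    have : o ∈ T.filter (fun o => decide (x.sum < o.1.sum)) := by
      rw [List.mem_filter]; exact ⟨homem, by simpa using hsum⟩
    have := List.length_pos_of_mem this
    omega
  | succ k ih =>
    intro x hx hk ⟨o, ho, hdom⟩
    have homem : o ∈ T := by rw [hT]; exact List.mem_append_left _ ho
    have hsum : x.sum < o.1.sum := by
      unfold domB at hdom
      simp only [Bool.and_eq_true, decide_eq_true_eq] at hdom
      omega
    by_cases hD : domDD T o.1 = true
    · -- o is itself dominated within T; its dominator is in processed, recurse
      unfold domDD at hD
      rw [List.any_eq_true] at hD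
      obtain ⟨o', ho'T, hdom'⟩ := hD
      have hsum' : o.1.sum < o'.1.sum := by
        unfold domB at hdom'
        simp only [Bool.and_eq_true, decide_eq_true_eq] at hdom'
        omega
      have ho'proc : o' ∈ processed := by
        rw [hT] at ho'T
        rcases List.mem_append.1 ho'T with h | h
        · exact h
        · exfalso
          have hpa := (List.pairwise_append.1 (hT ▸ hsort)).2.2
          have := hpa o ho o' h
          omega
      -- measure decreases
      have hmeas : (T.filter (fun o2 => decide (o.1.sum < o2.1.sum))).length ≤ k := by
        obtain ⟨s, t, hst⟩ := List.append_of_mem homem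
        have h1 : ∀ b ∈ T, decide (o.1.sum < b.1.sum) = true → decide (x.sum < b.1.sum) = true := by
          intro b _ hb
          simp only [decide_eq_true_eq] at *
          omega
        rw [show ∀ (l : List (List Int × String)) (p : List Int × String → Bool), (l.filter p).length = l.countP p from fun l p => List.countP_eq_length_filter.symm] at hk ⊢
        rw [hst] at hk ⊢
        rw [List.countP_append, List.countP_cons] at hk ⊢
        have hms : List.countP (fun o2 => decide (o.1.sum < o2.1.sum)) s ≤ List.countP (fun o2 => decide (x.sum < o2.1.sum)) s := by
          apply List.countP_mono_left
          intro b hb hbo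
          simp only [decide_eq_true_eq] at *
          omega
        have hmt : List.countP (fun o2 => decide (o.1.sum < o2.1.sum)) t ≤ List.countP (fun o2 => decide (x.sum < o2.1.sum)) t := by
          apply List.countP_mono_left
          intro b hb hbo
          simp only [decide_eq_true_eq] at *
          omega
        have hxo : (if decide (x.sum < o.1.sum) = true then 1 else 0) = 1 := by simp [hsum]
        have hoo : (if decide (o.1.sum < o.1.sum) = true then 1 else 0) = 0 := by simp
        omega
      obtain ⟨m, hm, hmD, hmdom⟩ := ih o.1 (hlen o homem) hmeas ⟨o', ho'proc, hdom'⟩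
      refine ⟨m, hm, hmD, ?_⟩
      have hmT : m ∈ T := by rw [hT]; exact List.mem_append_left _ hm
      exact domB_trans hx (hlen o homem) (hlen m hmT) hdom hmdom
    · exact ⟨o, ho, by simpa using hD, hdom⟩

theorem sweep_eq (T : List (List Int × String))
    (hsort : T.Pairwise (fun a b => b.1.sum ≤ a.1.sum))
    (hlen : ∀ p ∈ T, p.1.length = 26) :
    ∀ (rest processed : List (List Int × String)), T = processed ++ rest →
      rest.foldl (fun acc p => if acc.any (fun g => domB p.1 g) then acc else acc ++ [p.1])
        ((processed.filter (fun q => !domDD T q.1)).map (fun q => q.1))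
      = ((processed ++ rest).filter (fun q => !domDD T q.1)).map (fun q => q.1) := by
  intro rest
  induction rest with
  | nil => intro processed hT; simp
  | cons p rest' ih =>
    intro processed hT
    rw [List.foldl_cons]
    have hpT : p ∈ T := by
      rw [hT]; exact List.mem_append_right _ (List.mem_cons_self ..)
    have hcond : ((processed.filter (fun q => !domDD T q.1)).map (fun q => q.1)).any
        (fun g => domB p.1 g) = domDD T p.1 := by
      rw [Bool.eq_iff_iff, List.any_map, List.any_eq_true]
      constructor
      · rintro ⟨q, hq, hd⟩
        have hqproc : q ∈ processed := List.mem_of_mem_filter hq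
        have hqT : q ∈ T := by rw [hT]; exact List.mem_append_left _ hqproc
        unfold domDD
        rw [List.any_eq_true]
        exact ⟨q, hqT, hd⟩
      · intro h
        unfold domDD at h
        rw [List.any_eq_true] at h
        obtain ⟨o, hoT, hdom⟩ := h
        have hoproc : o ∈ processed := by
          rcases List.mem_append.1 (hT ▸ hoT) with h | h
          · exact h
          · exfalso
            rcases List.mem_cons.1 h with rfl | h
            · rw [domB_self] at hdom; cases hdom
            · have hpair := (List.pairwise_append.1 (hT ▸ hsort)).2.1
              have := (List.pairwise_cons.1 hpair).1 o h
              unfold domB at hdom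
              simp only [Bool.and_eq_true, decide_eq_true_eq] at hdom
              omega
        obtain ⟨m, hm, hmD, hmdom⟩ := domclose T processed (p :: rest') hT hsort hlen
          ((T.filter (fun o => decide (p.1.sum < o.1.sum))).length) p.1 (hlen p hpT)
          (le_refl _) ⟨o, hoproc, hdom⟩
        refine ⟨m, ?_, hmdom⟩
        rw [List.mem_filter]
        exact ⟨hm, by simp [hmD]⟩
    rw [hcond]
    have hassoc : processed ++ p :: rest' = (processed ++ [p]) ++ rest' := by simp
    by_cases hD : domDD T p.1 = true
    · rw [if_pos hD]
      have hfl : (processed.filter (fun q => !domDD T q.1)).map (fun q => q.1)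
          = ((processed ++ [p]).filter (fun q => !domDD T q.1)).map (fun q => q.1) := by
        rw [List.filter_append]
        simp [hD]
      rw [hfl, ih (processed ++ [p]) (by rw [hT, hassoc]), ← hassoc]
    · rw [if_neg hD]
      rw [Bool.not_eq_true] at hD
      have hfl : (processed.filter (fun q => !domDD T q.1)).map (fun q => q.1) ++ [p.1]
          = ((processed ++ [p]).filter (fun q => !domDD T q.1)).map (fun q => q.1) := by
        rw [List.filter_append]
        simp [hD]
      rw [hfl, ih (processed ++ [p]) (by rw [hT, hassoc]), ← hassoc]

theorem A_final (words : List String) :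
    (survivors words).foldl
      (fun acc c => if (survivors words).any
          (fun o => decide (o ≠ c) && isDominatedBy c.1 o.1) then acc else acc ++ [c.2])
      ([] : List String)
    = ((survivors words).filter (fun c => !domDD (survivors words) c.1)).map (fun c => c.2) := by
  have hlenS : ∀ p ∈ survivors words, p.1.length = 26 := by
    intro p hp
    unfold survivors at hp
    obtain ⟨w, _, rfl⟩ := List.mem_map.1 hp
    exact length_pyFreqVec w
  have hc : ∀ c ∈ survivors words,
      ((survivors words).any (fun o => decide (o ≠ c) && isDominatedBy c.1 o.1))
        = domDD (survivors words) c.1 := by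
    intro c hcmem
    unfold domDD
    apply PySem.List.any_congr_mem
    intro o homem
    rw [domEq (hlenS c hcmem) (hlenS o homem)]
    by_cases heq : o = c
    · subst heq
      rw [domB_self]
      simp
    · simp [heq]
  rw [PySem.List.foldl_congr_mem' _ _
      (fun acc c => if !domDD (survivors words) c.1 then acc ++ [c.2] else acc) _
      (by
        intro c hcmem acc
        rw [hc c hcmem]
        cases hD : domDD (survivors words) c.1 <;> simp [hD])]
  rw [PySem.List.foldl_append_if (fun c : List Int × String => !domDD (survivors words) c.1)
    (fun c : List Int × String => c.2)]
  rw [List.nil_append]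

theorem B_final (words : List String) :
    ((survivors words).filter (fun p =>
        ((PySem.List.sorted (survivors words) (fun p => p.1.sum) true).foldl
          (fun acc p => if acc.any (fun g => g.sum > p.1.sum &&
              (p.1.zip g).all (fun q => q.1 ≤ q.2)) then acc else acc ++ [p.1])
          ([] : List (List Int))).contains p.1)).map (fun p => p.2)
    = ((survivors words).filter (fun c => !domDD (survivors words) c.1)).map (fun c => c.2) := by
  have hlenS : ∀ p ∈ survivors words, p.1.length = 26 := by
    intro p hp
    unfold survivors at hp
    obtain ⟨w, _, rfl⟩ := List.mem_map.1 hp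
    exact length_pyFreqVec w
  have hperm : (PySem.List.sorted (survivors words) (fun p => p.1.sum) true).Perm (survivors words) :=
    PySem.List.sorted_perm ..
  have hmemTS : ∀ p, p ∈ PySem.List.sorted (survivors words) (fun p => p.1.sum) true ↔ p ∈ survivors words :=
    fun p => hperm.mem_iff
  have hDD : ∀ c, domDD (PySem.List.sorted (survivors words) (fun p => p.1.sum) true) c
      = domDD (survivors words) c := by
    intro c
    rw [Bool.eq_iff_iff]
    unfold domDD
    rw [List.any_eq_true, List.any_eq_true]
    constructor
    · rintro ⟨o, ho, h⟩; exact ⟨o, (hmemTS o).1 ho, h⟩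
    · rintro ⟨o, ho, h⟩; exact ⟨o, (hmemTS o).2 ho, h⟩
  have hsort : (PySem.List.sorted (survivors words) (fun p => p.1.sum) true).Pairwise
      (fun a b => b.1.sum ≤ a.1.sum) := PySem.List.sorted_pairwise_rev ..
  have hlenT : ∀ p ∈ PySem.List.sorted (survivors words) (fun p => p.1.sum) true, p.1.length = 26 :=
    fun p hp => hlenS p ((hmemTS p).1 hp)
  have hacc := sweep_eq _ hsort hlenT (PySem.List.sorted (survivors words) (fun p => p.1.sum) true) [] rfl
  simp only [List.filter_nil, List.map_nil, List.nil_append] at hacc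
  rw [show (fun (acc : List (List Int)) (p : List Int × String) =>
      if acc.any (fun g => g.sum > p.1.sum && (p.1.zip g).all (fun q => q.1 ≤ q.2)) then acc
      else acc ++ [p.1])
      = (fun (acc : List (List Int)) (p : List Int × String) =>
      if acc.any (fun g => domB p.1 g) then acc else acc ++ [p.1]) from rfl]
  rw [hacc]
  apply congrArg (List.map _)
  apply List.filter_congr
  intro c hcS
  rw [Bool.eq_iff_iff, List.contains_iff_mem]
  constructor
  · intro hmem
    obtain ⟨q, hq, hq1⟩ := List.mem_map.1 hmem
    have hqf := List.of_mem_filter hq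
    rw [hq1, hDD] at hqf
    exact hqf
  · intro hnd
    apply List.mem_map.2
    refine ⟨c, ?_, rfl⟩
    rw [List.mem_filter]
    exact ⟨(hmemTS c).2 hcS, by rw [hDD]; exact hnd⟩

theorem ab_eq (words : List String) :
    remove_anagrams_and_sub_anagrams_pairwise words
      = remove_anagrams_and_sub_anagrams_pairwise_alt words := by
  by_cases hnil : words = []
  · subst hnil; rfl
  · unfold remove_anagrams_and_sub_anagrams_pairwise remove_anagrams_and_sub_anagrams_pairwise_alt
    rw [if_neg hnil]
    simp only []
    rw [A_uniq_eq words, B_singles_eq words, A_final words, B_final words]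


-- ===== VERDICT (by name: the statement is the Claim_ definition above) =====
theorem remove_anagrams_and_sub_anagrams_pairwise_spec : Claim_equal_remove_anagrams_and_sub_anagrams_pairwise := by
  intro words _ _
  unfold Spec_remove_anagrams_and_sub_anagrams_pairwise
  exact ab_eq words
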